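-- pv_equiv track=rewrite | github.com/GeekSky98/Algorithm_lab | Baekjoon/Gold/배/explanation.py | solution
-- ===== SOURCE A (Python) =====
-- def solution(n, m, train, target):
--     train.sort(reverse=True)
--     target.sort(reverse=True)
--     if train[0] < target[0]:
--         return -1
--
--     answer = 0
--     while target:
--         answer += 1
--         for t in train:
--             if target and target[-1] > t:
--                 continue
--             for i, b in enumerate(target):
--                 if t >= b:
--                     target.pop(i)
--                     break
--
--     return answer
-- ===== SOURCE B (Python) =====
-- def solution(n, m, train, target):
--     # Note: A sorts `train`/`target` in place and empties `target`; B does not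
--     # mutate its arguments (return-value equivalence only).
--     tr = sorted(train, reverse=True)
--     tg = sorted(target, reverse=True)
--     if not tg:
--         return 0
--     if not tr or tr[0] < tg[0]:
--         return -1
--     rounds = 0
--     while tg:
--         rounds += 1
--         rest = []
--         i = 0  # next unused train (descending capacities)
--         for b in tg:  # boxes in descending order
--             if i < len(tr) and tr[i] >= b:
--                 i += 1  # train i takes box b (largest box it can carry)
--             else:
--                 rest.append(b)
--         tg = rest
--     return rounds
-- ===== Notes on version B (the rewrite author's own statement) =====
-- stated objective: alternative
-- what changed: Each delivery round is computed by a single two-pointer merge over the descending-sorted trains and boxes (each train takes the largest box it can carry) instead of A's per-train rescan of the box list with index pops and a last-element guard; B trades A's in-place pop bookkeeping for a rebuilt remainder list and does not mutate its arguments.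
import Mathlib
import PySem

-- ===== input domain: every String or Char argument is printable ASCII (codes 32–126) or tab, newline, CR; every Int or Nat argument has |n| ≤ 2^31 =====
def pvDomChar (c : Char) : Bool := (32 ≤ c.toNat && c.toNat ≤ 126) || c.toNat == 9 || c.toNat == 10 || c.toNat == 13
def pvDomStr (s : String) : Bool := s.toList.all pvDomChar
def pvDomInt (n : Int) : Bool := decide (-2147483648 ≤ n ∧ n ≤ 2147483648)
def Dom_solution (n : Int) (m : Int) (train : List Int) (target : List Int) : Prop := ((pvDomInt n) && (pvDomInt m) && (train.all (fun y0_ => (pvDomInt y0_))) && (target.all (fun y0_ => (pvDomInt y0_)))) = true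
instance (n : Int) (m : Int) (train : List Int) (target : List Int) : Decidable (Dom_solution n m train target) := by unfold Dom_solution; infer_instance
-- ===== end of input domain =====

-- B replaces A's per-train rescan-and-pop round with a single two-pointer merge per round
-- (alternative algorithm for a round); equivalence is about the RETURN value only: A sorts and empties its list
-- arguments in place, B does not mutate them.


-- ===== PORT A =====
-- inner 'for i, b in enumerate(target): if t >= b: target.pop(i); break'
def popA (t : Int) : List Int → List Int
  | [] => []
  | b :: bs => if t ≥ b then bs else b :: popA t bs

-- body of 'for t in train', acting on the current target list
def stepA (tgt : List Int) (t : Int) : List Int :=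
  match tgt.getLast? with          -- 'if target and target[-1] > t: continue'
  | some l => if l > t then tgt else popA t tgt
  | none => popA t tgt

-- 'while target: answer += 1; for t in train: ...'; the dite guard only makes the
-- recursion total — after A's '-1' check a round always removes at least one box.
def loopA (train : List Int) (tgt : List Int) (answer : Int) : Int :=
  if tgt = [] then answer
  else
    if h : (train.foldl stepA tgt).length < tgt.length then
      loopA train (train.foldl stepA tgt) (answer + 1)
    else answer + 1
termination_by tgt.length

def solution (n : Int) (m : Int) (train : List Int) (target : List Int) : Int :=
  let tr := PySem.List.sorted train (fun x => x) true
  let tg := PySem.List.sorted target (fun x => x) true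
  match tr, tg with
  | [], _ => 0              -- train[0]: IndexError in A; outside Pre_solution
  | _ :: _, [] => 0         -- target[0]: IndexError in A; outside Pre_solution
  | t0 :: tr', b0 :: tg' =>
    if t0 < b0 then -1 else loopA (t0 :: tr') (b0 :: tg') 0

-- ===== PORT B =====
-- one round as a two-pointer merge: boxes descending, trains descending; the current
-- train takes the first (= largest) box it can carry, skipped boxes are kept.
def coreB : List Int → List Int → List Int
  | _, [] => []
  | [], b :: bs => b :: coreB [] bs
  | t :: ts, b :: bs => if t ≥ b then coreB ts bs else b :: coreB (t :: ts) bs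

def loopB (tr : List Int) (tg : List Int) (rounds : Int) : Int :=
  if tg = [] then rounds
  else
    if h : (coreB tr tg).length < tg.length then
      loopB tr (coreB tr tg) (rounds + 1)
    else rounds + 1
termination_by tg.length

def solution_alt (n : Int) (m : Int) (train : List Int) (target : List Int) : Int :=
  let tr := PySem.List.sorted train (fun x => x) true
  let tg := PySem.List.sorted target (fun x => x) true
  match tg with
  | [] => 0
  | b0 :: tg' =>
    match tr with
    | [] => -1
    | t0 :: tr' => if t0 < b0 then -1 else loopB (t0 :: tr') (b0 :: tg') 0

-- ===== PRECONDITION & SPEC =====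
-- A indexes train[0] and target[0], raising IndexError on an empty list: Pre_ excludes
-- exactly the inputs where A raises.
def Pre_solution (n : Int) (m : Int) (train : List Int) (target : List Int) : Prop :=
  train ≠ [] ∧ target ≠ []
instance (n : Int) (m : Int) (train : List Int) (target : List Int) : Decidable (Pre_solution n m train target) := by unfold Pre_solution; infer_instance

def pvWitness_solution : Int × Int × List Int × List Int := (2, 3, [5, 2], [4, 1, 1])

def Spec_solution (n : Int) (m : Int) (train : List Int) (target : List Int) (out : Int) : Prop := out = solution_alt n m train target
instance (n : Int) (m : Int) (train : List Int) (target : List Int) (out : Int) : Decidable (Spec_solution n m train target out) := by unfold Spec_solution; infer_instance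

-- ===== CLAIM (what is proved, stated in full; the proofs are below) =====
def Claim_equal_solution : Prop := ∀ (n : Int) (m : Int) (train : List Int) (target : List Int), Dom_solution n m train target → Pre_solution n m train target → Spec_solution n m train target (solution n m train target)
-- ===== LEMMAS AND PROOFS =====

theorem popA_sublist (t : Int) (bs : List Int) : (popA t bs).Sublist bs := by
  induction bs with
  | nil => simp [popA]
  | cons b bs ih =>
    simp only [popA]
    split
    · exact (List.sublist_cons_self b bs)
    · exact ih.cons₂ b

theorem coreB_nil (bs : List Int) : coreB [] bs = bs := by
  induction bs with
  | nil => rfl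
  | cons b bs ih => simp [coreB, ih]

theorem coreB_sublist (ts bs : List Int) : (coreB ts bs).Sublist bs := by
  induction bs generalizing ts with
  | nil => cases ts <;> simp [coreB]
  | cons b bs ih =>
    cases ts with
    | nil => simpa [coreB] using (ih []).cons₂ b
    | cons t ts' =>
      simp only [coreB]
      split
      · exact (ih ts').cons b
      · exact (ih (t :: ts')).cons₂ b

theorem popA_eq_self_of_all_gt (t : Int) (bs : List Int) (h : ∀ b ∈ bs, t < b) :
    popA t bs = bs := by
  induction bs with
  | nil => rfl
  | cons b bs ih =>
    have hb := h b (by simp)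
    simp only [popA, if_neg (by omega : ¬ t ≥ b)]
    exact congrArg _ (ih fun x hx => h x (by simp [hx]))

theorem ge_last_of_pairwise (l : Int) : ∀ (bs : List Int),
    bs.Pairwise (fun a b => b ≤ a) → bs.getLast? = some l → ∀ b ∈ bs, l ≤ b
  | [], _, hl => by simp at hl
  | [b], _, hl => by
      simp only [List.getLast?_singleton, Option.some.injEq] at hl
      intro x hx; simp at hx; omega
  | b :: c :: cs, hp, hl => by
      have hl' : (c :: cs).getLast? = some l := by
        rw [← hl]; exact (List.getLast?_cons_cons ..).symm
      intro x hx
      rcases List.mem_cons.mp hx with rfl | hx'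
      · exact List.rel_of_pairwise_cons hp (List.mem_of_mem_getLast? hl')
      · exact ge_last_of_pairwise l (c :: cs) hp.of_cons hl' x hx'

theorem stepA_eq_popA (tgt : List Int) (t : Int)
    (hp : tgt.Pairwise (fun a b => b ≤ a)) : stepA tgt t = popA t tgt := by
  unfold stepA
  cases hl : tgt.getLast? with
  | none => rfl
  | some l =>
    dsimp only
    by_cases hgt : l > t
    · rw [if_pos hgt]
      exact (popA_eq_self_of_all_gt t tgt fun b hb =>
        lt_of_lt_of_le hgt (ge_last_of_pairwise l tgt hp hl b hb)).symm
    · rw [if_neg hgt]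

theorem coreB_cons_eq (t : Int) (ts bs : List Int)
    (hts : ∀ t' ∈ ts, t' ≤ t) (hp : bs.Pairwise (fun a b => b ≤ a)) :
    coreB (t :: ts) bs = coreB ts (popA t bs) := by
  induction bs with
  | nil => cases ts <;> simp [coreB, popA]
  | cons b bs ih =>
    by_cases htb : t ≥ b
    · simp [coreB, popA, if_pos htb]
    · have h1 : coreB (t :: ts) (b :: bs) = b :: coreB (t :: ts) bs := by
        simp [coreB, if_neg htb]
      have h2 : popA t (b :: bs) = b :: popA t bs := by
        simp [popA, if_neg htb]
      rw [h1, h2, ih hp.of_cons]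
      cases ts with
      | nil => simp [coreB]
      | cons t' ts' =>
        have : ¬ t' ≥ b := by have := hts t' (by simp); omega
        simp [coreB, if_neg this]

theorem foldl_stepA_eq_coreB (trains tgt : List Int)
    (hptr : trains.Pairwise (fun a b => b ≤ a))
    (hptg : tgt.Pairwise (fun a b => b ≤ a)) :
    trains.foldl stepA tgt = coreB trains tgt := by
  induction trains generalizing tgt with
  | nil => simp [coreB_nil]
  | cons t ts ih =>
    have hstep : stepA tgt t = popA t tgt := stepA_eq_popA tgt t hptg
    have hsub : (popA t tgt).Pairwise (fun a b : Int => b ≤ a) :=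
      hptg.sublist (popA_sublist t tgt)
    calc (t :: ts).foldl stepA tgt
        = ts.foldl stepA (popA t tgt) := by simp [List.foldl_cons, hstep]
      _ = coreB ts (popA t tgt) := ih _ hptr.of_cons hsub
      _ = coreB (t :: ts) tgt :=
          (coreB_cons_eq t ts tgt (fun t' h => List.rel_of_pairwise_cons hptr h) hptg).symm

theorem loops_eq (fuel : Nat) (t0 : Int) (tr' : List Int) :
    ∀ (tg : List Int) (ans : Int), tg.length ≤ fuel →
    (t0 :: tr').Pairwise (fun a b => b ≤ a) →
    tg.Pairwise (fun a b => b ≤ a) →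
    (∀ b ∈ tg, b ≤ t0) →
    loopA (t0 :: tr') tg ans = loopB (t0 :: tr') tg ans := by
  induction fuel with
  | zero =>
    intro tg ans hlen _ _ _
    have : tg = [] := List.length_eq_zero_iff.mp (Nat.le_zero.mp hlen)
    subst this
    rw [loopA.eq_def, loopB.eq_def]; simp
  | succ fuel ih =>
    intro tg ans hlen hptr hptg hle
    cases tg with
    | nil => rw [loopA.eq_def, loopB.eq_def]; simp
    | cons b bs =>
      have hround : (t0 :: tr').foldl stepA (b :: bs) = coreB (t0 :: tr') (b :: bs) :=
        foldl_stepA_eq_coreB _ _ hptr hptg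
      have ht0b : t0 ≥ b := hle b (by simp)
      have hcore : coreB (t0 :: tr') (b :: bs) = coreB tr' bs := by
        simp [coreB, if_pos ht0b]
      have hlt : (coreB (t0 :: tr') (b :: bs)).length < (b :: bs).length := by
        rw [hcore]
        exact Nat.lt_succ_of_le (coreB_sublist tr' bs).length_le
      rw [loopA.eq_def, loopB.eq_def]
      simp only [if_neg (by simp : ¬ (b :: bs = []))]
      rw [hround]
      rw [dif_pos hlt, dif_pos hlt]
      have hsub : (coreB (t0 :: tr') (b :: bs)).Sublist (b :: bs) :=
        coreB_sublist _ _
      exact ih _ _ (by omega) hptr (hptg.sublist hsub)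
        (fun x hx => hle x (hsub.mem hx))

theorem sorted_rev_pairwise_int (xs : List Int) :
    (PySem.List.sorted xs (fun x => x) true).Pairwise (fun a b => b ≤ a) := by
  simpa using PySem.List.sorted_pairwise_rev (xs := xs) (key := fun x : Int => x)

theorem sorted_rev_ne_nil (xs : List Int) (h : xs ≠ []) :
    PySem.List.sorted xs (fun x => x) true ≠ [] := by
  intro hc
  have := (PySem.List.sorted_perm (xs := xs) (key := fun x : Int => x) (rev := true)).length_eq
  rw [hc] at this
  exact h (List.length_eq_zero_iff.mp this.symm)

-- ===== VERDICT (by name: the statement is the Claim_ definition above) =====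
theorem solution_spec : Claim_equal_solution := by
  intro n m train target _ hpre
  unfold Spec_solution solution solution_alt
  obtain ⟨htr, htg⟩ := hpre
  have htr' := sorted_rev_ne_nil train htr
  have htg' := sorted_rev_ne_nil target htg
  cases hA : PySem.List.sorted train (fun x => x) true with
  | nil => exact absurd hA htr'
  | cons t0 tr' =>
    cases hB : PySem.List.sorted target (fun x => x) true with
    | nil => exact absurd hB htg'
    | cons b0 tg' =>
      simp only
      by_cases hlt : t0 < b0
      · rw [if_pos hlt, if_pos hlt]
      · rw [if_neg hlt, if_neg hlt]
        have hptr : (t0 :: tr').Pairwise (fun a b : Int => b ≤ a) := by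
          rw [← hA]; exact sorted_rev_pairwise_int train
        have hptg : (b0 :: tg').Pairwise (fun a b : Int => b ≤ a) := by
          rw [← hB]; exact sorted_rev_pairwise_int target
        refine loops_eq (b0 :: tg').length t0 tr' _ 0 le_rfl hptr hptg ?_
        intro b hb
        rcases List.mem_cons.mp hb with rfl | hb'
        · omega
        · have := List.rel_of_pairwise_cons hptg hb'
          omega
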